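-- pv_equiv track=rewrite | github.com/duguchangfen/Young-worker | MScirctl/MScirctl1.py | func
-- ===== SOURCE A (Python) =====
-- def func(lst):
-- 	new_list = []
-- 	for i,j in zip(lst,lst[1:]):
-- 		if j - i > 1:
-- 			new_list.append(lst[:lst.index(j)])
-- 			lst = lst[lst.index(j):]
-- 	new_list.append(lst)
-- 	return new_list
-- ===== SOURCE B (Python) =====
-- def func(lst):
--     segments = []
--     seg = []
--     prev = None
--     for x in lst:
--         if prev is not None and x - prev > 1:
--             segments.append(seg)
--             seg = []
--         seg.append(x)
--         prev = x
--     segments.append(seg)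
--     return segments
-- ===== Notes on version B (the rewrite author's own statement) =====
-- stated objective: faster
-- what changed: B does one pass with a running current-segment accumulator instead of A's repeated lst.index() lookups and repeated suffix re-slicing/rebinding of lst.
-- intended difference: On lists where some gap's right value lst[k+1] also occurs earlier inside the same gap-free segment (e.g. [1,3,1,3]), A's lst.index() finds the earlier duplicate and splits at the wrong place (producing e.g. an empty segment, [[1],[],[3,1,3]]), while B splits at the actual gap ([[1],[3,1],[3]]), which is the intended segmentation. — e.g. on func([1, 3, 1, 3]): A returns [[1], [], [3, 1, 3]], B returns [[1], [3, 1], [3]]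
import Mathlib
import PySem

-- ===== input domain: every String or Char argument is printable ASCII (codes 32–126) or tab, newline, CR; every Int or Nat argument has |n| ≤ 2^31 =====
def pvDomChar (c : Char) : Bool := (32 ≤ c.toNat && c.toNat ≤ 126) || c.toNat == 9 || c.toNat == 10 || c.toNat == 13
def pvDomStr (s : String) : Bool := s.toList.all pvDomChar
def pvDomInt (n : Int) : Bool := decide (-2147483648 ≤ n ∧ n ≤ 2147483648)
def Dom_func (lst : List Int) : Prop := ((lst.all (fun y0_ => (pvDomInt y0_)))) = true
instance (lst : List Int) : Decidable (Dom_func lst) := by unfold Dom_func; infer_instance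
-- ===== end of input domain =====

-- B replaces A's repeated lst.index() searches and suffix re-slicing by a single pass
-- with a running current-segment accumulator (objective: faster; return value only, A only rebinds lst).

-- ===== PORT A =====
-- loop over zip(lst, lst[1:]) with state (new_list, lst); the pair list is fixed up front,
-- 'lst' is rebound inside the loop exactly as in the Python.
-- lst.index(j) always succeeds in A (j lies ahead in the current lst), so the .getD 0
-- default of the none branch is unreachable; lst[:m] / lst[m:] with this 0 ≤ m are take/drop.
def funcLoop : List (Int × Int) → List (List Int) → List Int → List (List Int) × List Int
  | [], acc, cur => (acc, cur)
  | (i, j) :: rest, acc, cur =>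
    if j - i > 1 then
      let m := (PySem.List.index? cur j).getD 0
      funcLoop rest (acc ++ [cur.take m]) (cur.drop m)
    else funcLoop rest acc cur

def func (lst : List Int) : List (List Int) :=
  let r := funcLoop (lst.zip (lst.drop 1)) [] lst
  r.1 ++ [r.2]

-- ===== PORT B =====
-- one pass; state (segments, seg, prev): on a gap flush seg, then always append x and set prev.
def funcAltStep (st : List (List Int) × List Int × Option Int) (x : Int) :
    List (List Int) × List Int × Option Int :=
  match st with
  | (segments, seg, prev) =>
    let fl : List (List Int) × List Int :=
      match prev with
      | some p => if x - p > 1 then (segments ++ [seg], []) else (segments, seg)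
      | none => (segments, seg)
    (fl.1, fl.2 ++ [x], some x)

def func_alt (lst : List Int) : List (List Int) :=
  let r := lst.foldl funcAltStep ([], [], none)
  r.1 ++ [r.2.1]

-- ===== PRECONDITION & SPEC =====
-- On lists where some gap's right value lst[k+1] also occurs earlier inside the same
-- gap-free segment, A's lst.index() finds the earlier duplicate and splits at the wrong
-- place (e.g. [1,3,1,3] ↦ [[1],[],[3,1,3]], with an empty segment), while B splits at the
-- actual gap ([[1],[3,1],[3]]), which is the intended segmentation.
def D_func (lst : List Int) : Prop :=
  ∃ k < lst.length - 1, ∃ m ≤ k, lst.getD m 0 = lst.getD (k + 1) 0 ∧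
    ∀ t ≤ k, m ≤ t → (lst.getD (t + 1) 0 - lst.getD t 0 ≤ 1 ↔ t < k)
instance (lst : List Int) : Decidable (D_func lst) := by unfold D_func; infer_instance

def Spec_func (lst : List Int) (out : List (List Int)) : Prop := ¬ D_func lst → out = func_alt lst
instance (lst : List Int) (out : List (List Int)) : Decidable (Spec_func lst out) := by unfold Spec_func; infer_instance

def pvDiffWitness_func : List Int := [1, 3, 1, 3]
def pvDiffWitnessOut_func : (List (List Int)) × (List (List Int)) :=
  ([[1], [], [3, 1, 3]], [[1], [3, 1], [3]])

-- ===== CLAIM (what is proved, stated in full; the proofs are below) =====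
def Claim_unchanged_func : Prop := ∀ (lst : List Int), Dom_func lst → Spec_func lst (func lst)
def Claim_exact_func : Prop := ∀ (lst : List Int), Dom_func lst → D_func lst → func lst ≠ func_alt lst
def Claim_changed_func : Prop := Dom_func (pvDiffWitness_func) ∧ D_func (pvDiffWitness_func) ∧ func (pvDiffWitness_func) = pvDiffWitnessOut_func.1 ∧ func_alt (pvDiffWitness_func) = pvDiffWitnessOut_func.2 ∧ pvDiffWitnessOut_func.1 ≠ pvDiffWitnessOut_func.2

-- ===== LEMMAS AND PROOFS =====

-- common specification: chunkC seg r = the segments of r, with seg prefixed to the first one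
def chunkC : List Int → List Int → List (List Int)
  | seg, [] => [seg]
  | seg, [x] => [seg ++ [x]]
  | seg, x :: y :: t =>
    if y - x > 1 then (seg ++ [x]) :: chunkC [] (y :: t) else chunkC (seg ++ [x]) (y :: t)

-- B's fold computes chunkC
theorem altLoop_eq (r : List Int) : ∀ (acc : List (List Int)) (seg : List Int) (x : Int),
    (List.foldl funcAltStep (acc, seg ++ [x], some x) r).1
      ++ [(List.foldl funcAltStep (acc, seg ++ [x], some x) r).2.1]
    = acc ++ chunkC seg (x :: r) := by
  induction r with
  | nil => intro acc seg x; simp [chunkC]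
  | cons y t ih =>
    intro acc seg x
    by_cases h : y - x > 1
    · have hs : funcAltStep (acc, seg ++ [x], some x) y = (acc ++ [seg ++ [x]], [] ++ [y], some y) := by
        simp [funcAltStep, h]
      rw [List.foldl_cons, hs, ih]
      simp [chunkC, h]
    · have hs : funcAltStep (acc, seg ++ [x], some x) y = (acc, (seg ++ [x]) ++ [y], some y) := by
        simp [funcAltStep, h]
      rw [List.foldl_cons, hs, ih]
      simp [chunkC, h]

theorem func_alt_eq_chunk (lst : List Int) : func_alt lst = chunkC [] lst := by
  cases lst with
  | nil => simp [func_alt, chunkC]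
  | cons x t =>
    show (List.foldl funcAltStep (funcAltStep ([], [], none) x) t).1
        ++ [(List.foldl funcAltStep (funcAltStep ([], [], none) x) t).2.1] = _
    have hs : funcAltStep ([], [], none) x = ([], ([] : List Int) ++ [x], some x) := by
      simp [funcAltStep]
    rw [hs, altLoop_eq]
    simp

-- the invariant A's loop needs: at every gap, the right value is not already in the current segment
def GoodSeg : List Int → List Int → Prop
  | _, [] => True
  | _, [_] => True
  | seg, x :: y :: t =>
    (y - x > 1 → y ∉ seg ++ [x]) ∧ GoodSeg (if y - x > 1 then [] else seg ++ [x]) (y :: t)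

theorem index?_prefix_self {p t : List Int} {y : Int} (h : y ∉ p) :
    PySem.List.index? (p ++ y :: t) y = some p.length :=
  (PySem.List.index?_eq_some_iff _ _ _).mpr ⟨p, t, rfl, rfl, h⟩

-- A's loop computes chunkC under GoodSeg
theorem aLoop_eq (r : List Int) : ∀ (seg : List Int) (acc : List (List Int)), GoodSeg seg r →
    (funcLoop (r.zip r.tail) acc (seg ++ r)).1
      ++ [(funcLoop (r.zip r.tail) acc (seg ++ r)).2]
    = acc ++ chunkC seg r := by
  induction r with
  | nil => intro seg acc _; simp [funcLoop, chunkC]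
  | cons x r ih =>
    intro seg acc hg
    cases r with
    | nil => simp [funcLoop, chunkC]
    | cons y t =>
      have hzip : (x :: y :: t).zip (x :: y :: t).tail = (x, y) :: ((y :: t).zip (y :: t).tail) := rfl
      by_cases h : y - x > 1
      · have hnm : y ∉ seg ++ [x] := hg.1 h
        have hsplit : seg ++ x :: y :: t = (seg ++ [x]) ++ y :: t := by simp
        have hidx : PySem.List.index? (seg ++ x :: y :: t) y = some (seg ++ [x]).length := by
          rw [hsplit]; exact index?_prefix_self hnm
        have hgood : GoodSeg [] (y :: t) := by
          have h2 := hg.2; rwa [if_pos h] at h2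
        have htake : (seg ++ x :: y :: t).take (seg ++ [x]).length = seg ++ [x] := by
          rw [hsplit, List.take_left]
        have hdrop : (seg ++ x :: y :: t).drop (seg ++ [x]).length = y :: t := by
          rw [hsplit, List.drop_left]
        rw [hzip]
        show (funcLoop ((x, y) :: ((y :: t).zip (y :: t).tail)) acc (seg ++ x :: y :: t)).1 ++ _ = _
        rw [funcLoop, if_pos h]
        simp only [hidx, Option.getD_some, htake, hdrop]
        have hih := ih [] (acc ++ [seg ++ [x]]) hgood
        simp only [List.nil_append] at hih
        rw [hih]
        simp [chunkC, h]
      · have hgood : GoodSeg (seg ++ [x]) (y :: t) := by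
          have h2 := hg.2; rwa [if_neg h] at h2
        rw [hzip]
        show (funcLoop ((x, y) :: ((y :: t).zip (y :: t).tail)) acc (seg ++ x :: y :: t)).1 ++ _ = _
        rw [funcLoop, if_neg h]
        have hsplit : seg ++ x :: y :: t = (seg ++ [x]) ++ (y :: t) := by simp
        rw [hsplit, ih (seg ++ [x]) acc hgood]
        simp [chunkC, h]

-- consecutive differences all ≤ 1
def AdjOk : List Int → Prop
  | a :: b :: t => b - a ≤ 1 ∧ AdjOk (b :: t)
  | _ => True

theorem adjOk_snoc : ∀ (l : List Int) (x y : Int), AdjOk (l ++ [x]) → y - x ≤ 1 → AdjOk ((l ++ [x]) ++ [y])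
  | [], _, _, _, hy => ⟨hy, trivial⟩
  | [_], _, _, h, hy => ⟨h.1, hy, trivial⟩
  | _ :: b :: l, x, y, h, hy => ⟨h.1, adjOk_snoc (b :: l) x y h.2 hy⟩

theorem adjOk_getD : ∀ (l : List Int), AdjOk l → ∀ i, i + 1 < l.length → l.getD (i + 1) 0 - l.getD i 0 ≤ 1
  | _ :: _ :: _, h, 0, _ => by simpa using h.1
  | a :: b :: t, h, (i+1), hi => by
      simpa using adjOk_getD (b :: t) h.2 i (by simpa using hi)
  | [], _, i, hi => absurd hi (by simp)
  | [a], _, i, hi => by simp at hi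

theorem getD_append_add (pre l : List Int) (i : Nat) :
    (pre ++ l).getD (pre.length + i) 0 = l.getD i 0 := by
  induction pre with
  | nil => simp
  | cons a p ih =>
    have he : (a :: p).length + i = (p.length + i) + 1 := by simp; omega
    rw [List.cons_append, he, List.getD_cons_succ, ih]

theorem getD_append_lt (l l' : List Int) : ∀ (i : Nat), i < l.length → (l ++ l').getD i 0 = l.getD i 0 := by
  induction l with
  | nil => intro i hi; simp at hi
  | cons a p ih =>
    intro i hi
    cases i with
    | zero => simp
    | succ j => simpa using ih j (by simpa using hi)

-- ¬ D_ gives the invariant, generalized over a decomposition lst = pre ++ seg ++ r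
theorem notD_good_aux (lst : List Int) (hD : ¬ D_func lst) :
    ∀ (r seg pre : List Int), lst = pre ++ seg ++ r →
      AdjOk (seg ++ r.take 1) → GoodSeg seg r := by
  intro r
  induction r with
  | nil => intro seg pre _ _; trivial
  | cons x r ih =>
    intro seg pre heq hch
    cases r with
    | nil => trivial
    | cons y t =>
      have hch1 : AdjOk (seg ++ [x]) := by simpa using hch
      constructor
      · intro hgap hmem
        apply hD
        -- first occurrence of y inside seg ++ [x] gives a decomposition q ++ y :: s
        obtain ⟨k0, hk0⟩ := Option.isSome_iff_exists.mp ((PySem.List.index?_isSome_iff _ _).mpr hmem)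
        obtain ⟨q, s, hqs, hqlen, hynq⟩ := (PySem.List.index?_eq_some_iff _ _ _).mp hk0
        -- global positions
        have hlst1 : lst = (pre ++ q) ++ y :: (s ++ y :: t) := by
          rw [heq]
          have : seg ++ x :: y :: t = (seg ++ [x]) ++ y :: t := by simp
          rw [List.append_assoc, this, hqs]; simp
        have hql : q.length ≤ seg.length := by
          have := congrArg List.length hqs; simp at this; omega
        have hy1 : lst.getD (pre.length + seg.length + 1) 0 = y := by
          have hsp : lst = (pre ++ seg ++ [x]) ++ y :: t := by rw [heq]; simp
          have hln : pre.length + seg.length + 1 = (pre ++ seg ++ [x]).length + 0 := by simp; omega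
          rw [hsp, hln, getD_append_add]; simp
        have hx1 : lst.getD (pre.length + seg.length) 0 = x := by
          have hsp : lst = (pre ++ seg) ++ x :: y :: t := by rw [heq]
          have hln : pre.length + seg.length = (pre ++ seg).length + 0 := by simp
          rw [hsp, hln, getD_append_add]; simp
        have hm1 : lst.getD (pre.length + q.length) 0 = y := by
          have hln : pre.length + q.length = (pre ++ q).length + 0 := by simp
          rw [hlst1, hln, getD_append_add]; simp
        refine ⟨pre.length + seg.length, ?_, pre.length + q.length, by omega, by rw [hm1, hy1], ?_⟩
        · rw [heq]; simp; try omega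
        intro u hu hmu
        by_cases hk : u = pre.length + seg.length
        · subst hk
          constructor
          · intro hle
            rw [hy1, hx1] at hle; omega
          · intro hlt; omega
        · have hu' : u < pre.length + seg.length := by omega
          obtain ⟨i, hi, hiu⟩ : ∃ i, i < seg.length ∧ u = pre.length + i :=
            ⟨u - pre.length, by omega, by omega⟩
          subst hiu
          have hsp : lst = pre ++ ((seg ++ [x]) ++ y :: t) := by rw [heq]; simp
          have e1 : lst.getD (pre.length + i) 0 = (seg ++ [x]).getD i 0 := by
            rw [hsp, getD_append_add, getD_append_lt _ _ i (by simp; omega)]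
          have e2 : lst.getD (pre.length + i + 1) 0 = (seg ++ [x]).getD (i + 1) 0 := by
            have hln : pre.length + i + 1 = pre.length + (i + 1) := by omega
            rw [hsp, hln, getD_append_add, getD_append_lt _ _ (i + 1) (by simp; omega)]
          have hdiff : lst.getD (pre.length + i + 1) 0 - lst.getD (pre.length + i) 0 ≤ 1 := by
            rw [e1, e2]
            exact adjOk_getD (seg ++ [x]) hch1 i (by simp; omega)
          exact ⟨fun _ => by omega, fun _ => hdiff⟩
      · by_cases h : y - x > 1
        · rw [if_pos h]
          refine ih [] (pre ++ seg ++ [x]) (by rw [heq]; simp) ?_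
          simp [AdjOk]
        · rw [if_neg h]
          refine ih (seg ++ [x]) pre (by rw [heq]; simp) ?_
          have hgoal : AdjOk ((seg ++ [x]) ++ [y]) := adjOk_snoc seg x y hch1 (by omega)
          simpa using hgoal

-- failure of the invariant, with the FIRST failing gap marked
def BadSeg : List Int → List Int → Prop
  | _, [] => False
  | _, [_] => False
  | seg, x :: y :: t =>
    (y - x > 1 ∧ y ∈ seg ++ [x]) ∨
    ((y - x > 1 → y ∉ seg ++ [x]) ∧ BadSeg (if y - x > 1 then [] else seg ++ [x]) (y :: t))

theorem good_or_bad : ∀ (r seg : List Int), GoodSeg seg r ∨ BadSeg seg r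
  | [], _ => Or.inl trivial
  | [_], _ => Or.inl trivial
  | x :: y :: t, seg => by
    by_cases h : y - x > 1 ∧ y ∈ seg ++ [x]
    · exact Or.inr (Or.inl h)
    · have hgn : y - x > 1 → y ∉ seg ++ [x] := fun hg hm => h ⟨hg, hm⟩
      rcases good_or_bad (y :: t) (if y - x > 1 then [] else seg ++ [x]) with hG | hB
      · exact Or.inl ⟨hgn, hG⟩
      · exact Or.inr (Or.inr ⟨hgn, hB⟩)

theorem getD_mem_of_lt : ∀ (l : List Int) (i : Nat), i < l.length → l.getD i 0 ∈ l
  | a :: t, 0, _ => by simp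
  | a :: t, (i+1), h =>
    List.mem_cons_of_mem a (getD_mem_of_lt t i (by simpa using h))

-- a GoodSeg scan admits no D_ witness ahead of the current position
theorem good_notD_aux (lst : List Int) (k m : Nat)
    (hval : lst.getD m 0 = lst.getD (k + 1) 0)
    (hiff : ∀ t ≤ k, m ≤ t → (lst.getD (t + 1) 0 - lst.getD t 0 ≤ 1 ↔ t < k))
    (hk : k < lst.length - 1) (hmk : m ≤ k) :
    ∀ (r seg pre : List Int), lst = pre ++ seg ++ r →
      (pre = [] ∨ 1 < lst.getD pre.length 0 - lst.getD (pre.length - 1) 0) →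
      pre.length + seg.length ≤ k →
      GoodSeg seg r → False := by
  intro r
  induction r with
  | nil =>
    intro seg pre heq _ hpos _
    have hn := congrArg List.length heq
    simp at hn; omega
  | cons x r ih =>
    cases r with
    | nil =>
      intro seg pre heq _ hpos _
      have hn := congrArg List.length heq
      simp at hn; omega
    | cons y t =>
      intro seg pre heq hbound hpos hg
      have hy1 : lst.getD (pre.length + seg.length + 1) 0 = y := by
        have hsp : lst = (pre ++ seg ++ [x]) ++ y :: t := by rw [heq]; simp
        have hln : pre.length + seg.length + 1 = (pre ++ seg ++ [x]).length + 0 := by simp; omega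
        rw [hsp, hln, getD_append_add]; simp
      have hx1 : lst.getD (pre.length + seg.length) 0 = x := by
        have hsp : lst = (pre ++ seg) ++ x :: y :: t := by rw [heq]
        have hln : pre.length + seg.length = (pre ++ seg).length + 0 := by simp
        rw [hsp, hln, getD_append_add]; simp
      by_cases hgk : pre.length + seg.length = k
      · -- the witness gap is the current pair
        have hky : lst.getD (k + 1) 0 = y := by rw [← hgk]; exact hy1
        have hkx : lst.getD k 0 = x := by rw [← hgk]; exact hx1
        have hgap : y - x > 1 := by
          have h := hiff k le_rfl hmk
          rw [hky, hkx] at h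
          have h2 : ¬ (y - x ≤ 1) := fun hle => absurd (h.mp hle) (lt_irrefl k)
          omega
        by_cases hm : m < pre.length
        · rcases hbound with hb0 | hbgap
          · rw [hb0] at hm; simp at hm
          · have ht := hiff (pre.length - 1) (by omega) (by omega)
            have he : pre.length - 1 + 1 = pre.length := by omega
            rw [he] at ht
            have hle := ht.mpr (by omega)
            omega
        · have hmg : lst.getD m 0 = (seg ++ [x]).getD (m - pre.length) 0 := by
            have hsp : lst = pre ++ ((seg ++ [x]) ++ y :: t) := by rw [heq]; simp
            have h1 : lst.getD (pre.length + (m - pre.length)) 0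
                = ((seg ++ [x]) ++ y :: t).getD (m - pre.length) 0 := by
              rw [hsp, getD_append_add]
            have h2 : ((seg ++ [x]) ++ y :: t).getD (m - pre.length) 0
                = (seg ++ [x]).getD (m - pre.length) 0 :=
              getD_append_lt _ _ _ (by simp; omega)
            have hm' : pre.length + (m - pre.length) = m := by omega
            rw [hm'] at h1; rw [h1, h2]
          have hmy : (seg ++ [x]).getD (m - pre.length) 0 = y := by
            rw [← hmg, hval, hky]
          have hymem : y ∈ seg ++ [x] := by
            rw [← hmy]
            exact getD_mem_of_lt _ _ (by simp; omega)
          exact hg.1 hgap hymem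
      · by_cases hgy : y - x > 1
        · by_cases hmle : m ≤ pre.length + seg.length
          · have ht := hiff (pre.length + seg.length) (by omega) hmle
            have hle := ht.mpr (by omega)
            rw [hy1, hx1] at hle; omega
          · have hgood : GoodSeg [] (y :: t) := by
              have h2 := hg.2; rwa [if_pos hgy] at h2
            refine ih [] (pre ++ seg ++ [x]) (by rw [heq]; simp) (Or.inr ?_) (by simp only [List.length_append, List.length_cons, List.length_nil]; try omega) hgood
            have hl1 : (pre ++ seg ++ [x]).length = pre.length + seg.length + 1 := by simp only [List.length_append, List.length_cons, List.length_nil]; try omega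
            rw [hl1]
            have hl2 : pre.length + seg.length + 1 - 1 = pre.length + seg.length := by omega
            rw [hl2, hy1, hx1]; omega
        · have hgood : GoodSeg (seg ++ [x]) (y :: t) := by
            have h2 := hg.2; rwa [if_neg hgy] at h2
          exact ih (seg ++ [x]) pre (by rw [heq]; simp) hbound (by simp; omega) hgood

theorem good_notD (lst : List Int) (hg : GoodSeg [] lst) : ¬ D_func lst := by
  rintro ⟨k, hk, m, hmk, hval, hiff⟩
  exact good_notD_aux lst k m hval hiff hk hmk lst [] [] (by simp) (Or.inl rfl) (by simp) hg

theorem funcLoop_prefix : ∀ (ps : List (Int × Int)) (acc : List (List Int)) (cur : List Int),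
    ∃ rest, (funcLoop ps acc cur).1 ++ [(funcLoop ps acc cur).2] = acc ++ rest := by
  intro ps
  induction ps with
  | nil => intro acc cur; exact ⟨[cur], rfl⟩
  | cons p t ih =>
    intro acc cur
    obtain ⟨i, j⟩ := p
    by_cases h : j - i > 1
    · rw [funcLoop, if_pos h]
      obtain ⟨rest, hr⟩ :=
        ih (acc ++ [cur.take ((PySem.List.index? cur j).getD 0)])
           (cur.drop ((PySem.List.index? cur j).getD 0))
      exact ⟨[cur.take ((PySem.List.index? cur j).getD 0)] ++ rest, by rw [hr]; simp⟩
    · rw [funcLoop, if_neg h]; exact ih acc cur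

-- under BadSeg, A's loop result differs from chunkC
theorem bad_ne (r : List Int) : ∀ (seg : List Int) (acc : List (List Int)), BadSeg seg r →
    (funcLoop (r.zip r.tail) acc (seg ++ r)).1 ++ [(funcLoop (r.zip r.tail) acc (seg ++ r)).2]
      ≠ acc ++ chunkC seg r := by
  induction r with
  | nil => intro seg acc hb; exact hb.elim
  | cons x r ih =>
    cases r with
    | nil => intro seg acc hb; exact hb.elim
    | cons y t =>
      intro seg acc hb
      rcases hb with ⟨hgap, hmem⟩ | ⟨hgn, hbt⟩
      · -- the first bad gap: A appends a strictly shorter list than chunkC's seg ++ [x]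
        obtain ⟨k0, hk0⟩ := Option.isSome_iff_exists.mp ((PySem.List.index?_isSome_iff _ _).mpr hmem)
        obtain ⟨q, s2, hqs, hqlen, hynq⟩ := (PySem.List.index?_eq_some_iff _ _ _).mp hk0
        have hql : q.length ≤ seg.length := by
          have := congrArg List.length hqs; simp at this; omega
        have hidx : PySem.List.index? (seg ++ x :: y :: t) y = some k0 := by
          have hsp : seg ++ x :: y :: t = (seg ++ [x]) ++ y :: t := by simp
          rw [hsp, PySem.List.index?_append_of_mem _ hmem, hk0]
        show (funcLoop ((x, y) :: ((y :: t).zip (y :: t).tail)) acc (seg ++ x :: y :: t)).1 ++ [(funcLoop ((x, y) :: ((y :: t).zip (y :: t).tail)) acc (seg ++ x :: y :: t)).2] ≠ acc ++ chunkC seg (x :: y :: t)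
        rw [funcLoop, if_pos hgap]
        simp only [hidx, Option.getD_some]
        obtain ⟨rest, hr⟩ := funcLoop_prefix ((y :: t).zip (y :: t).tail)
          (acc ++ [(seg ++ x :: y :: t).take k0]) ((seg ++ x :: y :: t).drop k0)
        rw [hr]
        have hch : chunkC seg (x :: y :: t) = (seg ++ [x]) :: chunkC [] (y :: t) := by
          rw [chunkC, if_pos hgap]
        rw [hch]
        intro hEqq
        rw [List.append_assoc] at hEqq
        have h2 : [(seg ++ x :: y :: t).take k0] ++ rest = (seg ++ [x]) :: chunkC [] (y :: t) :=
          List.append_cancel_left hEqq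
        have h3 : (seg ++ x :: y :: t).take k0 = seg ++ [x] := by
          have := congrArg (fun l => l.headI) h2
          simpa using this
        have h4 := congrArg List.length h3
        simp at h4; omega
      · by_cases h : y - x > 1
        · have hnm : y ∉ seg ++ [x] := hgn h
          have hsplit : seg ++ x :: y :: t = (seg ++ [x]) ++ y :: t := by simp
          have hidx : PySem.List.index? (seg ++ x :: y :: t) y = some (seg ++ [x]).length := by
            rw [hsplit]; exact index?_prefix_self hnm
          have hbad : BadSeg [] (y :: t) := by
            have h2 := hbt; rwa [if_pos h] at h2
          have htake : (seg ++ x :: y :: t).take (seg ++ [x]).length = seg ++ [x] := by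
            rw [hsplit, List.take_left]
          have hdrop : (seg ++ x :: y :: t).drop (seg ++ [x]).length = y :: t := by
            rw [hsplit, List.drop_left]
          show (funcLoop ((x, y) :: ((y :: t).zip (y :: t).tail)) acc (seg ++ x :: y :: t)).1 ++ [(funcLoop ((x, y) :: ((y :: t).zip (y :: t).tail)) acc (seg ++ x :: y :: t)).2] ≠ acc ++ chunkC seg (x :: y :: t)
          rw [funcLoop, if_pos h]
          simp only [hidx, Option.getD_some, htake, hdrop]
          have hch : chunkC seg (x :: y :: t) = (seg ++ [x]) :: chunkC [] (y :: t) := by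
            rw [chunkC, if_pos h]
          rw [hch]
          have hih := ih [] (acc ++ [seg ++ [x]]) hbad
          simp only [List.nil_append] at hih
          intro hEqq
          apply hih
          rw [hEqq]; simp
        · have hbad : BadSeg (seg ++ [x]) (y :: t) := by
            have h2 := hbt; rwa [if_neg h] at h2
          show (funcLoop ((x, y) :: ((y :: t).zip (y :: t).tail)) acc (seg ++ x :: y :: t)).1 ++ [(funcLoop ((x, y) :: ((y :: t).zip (y :: t).tail)) acc (seg ++ x :: y :: t)).2] ≠ acc ++ chunkC seg (x :: y :: t)
          rw [funcLoop, if_neg h]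
          have hsplit : seg ++ x :: y :: t = (seg ++ [x]) ++ (y :: t) := by simp
          rw [hsplit]
          have hch : chunkC seg (x :: y :: t) = chunkC (seg ++ [x]) (y :: t) := by
            rw [chunkC, if_neg h]
          rw [hch]
          exact ih (seg ++ [x]) acc hbad

-- ===== VERDICT (by name: the statement is the Claim_ definition above) =====
theorem func_spec : Claim_unchanged_func := by
  intro lst _
  unfold Spec_func
  intro hnd
  have hgood : GoodSeg [] lst := by
    refine notD_good_aux lst hnd lst [] [] (by simp) ?_
    cases lst with
    | nil => trivial
    | cons a t => trivial
  have hmain := aLoop_eq lst [] [] hgood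
  simp only [List.nil_append] at hmain
  rw [func_alt_eq_chunk]
  show (funcLoop (lst.zip (lst.drop 1)) [] lst).1 ++ [(funcLoop (lst.zip (lst.drop 1)) [] lst).2] = _
  rw [List.drop_one]
  simpa using hmain

theorem func_changed : Claim_changed_func := by
  unfold Claim_changed_func; decide

theorem func_tight : Claim_exact_func := by
  intro lst _ hd hEq
  rcases good_or_bad lst [] with hg | hb
  · exact good_notD lst hg hd
  · have hne := bad_ne lst [] [] hb
    simp only [List.nil_append] at hne
    apply hne
    rw [← func_alt_eq_chunk lst, ← hEq]
    show (funcLoop (lst.zip lst.tail) [] lst).1 ++ [(funcLoop (lst.zip lst.tail) [] lst).2]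
        = (funcLoop (lst.zip (lst.drop 1)) [] lst).1 ++ [(funcLoop (lst.zip (lst.drop 1)) [] lst).2]
    rw [List.drop_one]
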